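-- pv_equiv track=rewrite | github.com/temameta/CodeWars | Printer Errors.py | printer_error
-- ===== SOURCE A (Python) =====
-- def printer_error(s):
--     unacceptable_symbols = ["n","o","p","q","r","s","t","u","v","w","x","y","z"]
--     count_errors = 0
--     for k in s:
--         for i in unacceptable_symbols:
--             if k == i:
--                 count_errors += 1
--     return str(count_errors) + "/" + str(len(s))
-- ===== SOURCE B (Python) =====
-- def printer_error(s):
--     # Different algorithm: sort the character ordinals once, then locate the
--     # block of unacceptable letters ('n'..'z', ordinals 110..122) with two
--     # binary searches; its width is the error count.
--     t = sorted(map(ord, s))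
--
--     def lower_bound(x):
--         # first index i with t[i] >= x (len(t) if none)
--         lo, hi = 0, len(t)
--         while lo < hi:
--             mid = (lo + hi) // 2
--             if t[mid] < x:
--                 lo = mid + 1
--             else:
--                 hi = mid
--         return lo
--
--     count = lower_bound(123) - lower_bound(110)
--     return str(count) + "/" + str(len(s))
-- ===== Notes on version B (the rewrite author's own statement) =====
-- stated objective: alternative
-- what changed: Instead of A's nested scan of every character against a 13-element table, B sorts the character ordinals once and finds the width of the contiguous unacceptable block (ordinals 110..122) with two hand-written binary searches.
import Mathlib
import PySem

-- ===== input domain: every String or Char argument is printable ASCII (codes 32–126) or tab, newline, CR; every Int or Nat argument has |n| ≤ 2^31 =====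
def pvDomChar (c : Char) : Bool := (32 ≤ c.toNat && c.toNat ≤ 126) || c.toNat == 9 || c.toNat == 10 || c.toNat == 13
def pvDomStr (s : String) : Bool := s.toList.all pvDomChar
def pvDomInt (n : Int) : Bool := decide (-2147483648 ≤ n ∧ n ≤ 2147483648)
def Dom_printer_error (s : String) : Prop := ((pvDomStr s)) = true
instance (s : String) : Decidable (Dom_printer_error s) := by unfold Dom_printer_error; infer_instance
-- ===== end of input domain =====

-- B replaces A's nested scan over a 13-letter table by a different algorithm:
-- sort the character ordinals once, then locate the unacceptable block
-- (ordinals 110..122) with two hand-written binary searches; same output format.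


-- ===== PORT A =====
def unacceptable_symbols : List Char :=
  ['n','o','p','q','r','s','t','u','v','w','x','y','z']

def printer_error (s : String) : String :=
  let count_errors : Int :=
    s.toList.foldl
      (fun acc k =>
        unacceptable_symbols.foldl (fun c i => if k == i then c + 1 else c) acc)
      0
  PySem.Int.toStr count_errors ++ "/" ++ PySem.Int.toStr (s.toList.length : Int)

-- ===== PORT B =====
-- Source B's hand-written lower_bound: first index i in [lo,hi) with ¬ t[i] < x
def lower_bound (t : List Int) (x : Int) (lo hi : Nat) : Nat :=
  if _h : lo < hi then
    let mid := (lo + hi) / 2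
    if t.getD mid 0 < x then lower_bound t x (mid + 1) hi
    else lower_bound t x lo mid
  else lo
termination_by hi - lo
decreasing_by all_goals omega

def printer_error_alt (s : String) : String :=
  let t : List Int := PySem.List.sorted (s.toList.map (fun c => (c.toNat : Int))) (fun x => x) false
  let count : Int := (lower_bound t 123 0 t.length : Int) - (lower_bound t 110 0 t.length : Int)
  PySem.Int.toStr count ++ "/" ++ PySem.Int.toStr (s.toList.length : Int)

-- ===== PRECONDITION & SPEC =====
def Spec_printer_error (s : String) (out : String) : Prop := out = printer_error_alt s
instance (s : String) (out : String) : Decidable (Spec_printer_error s out) := by unfold Spec_printer_error; infer_instance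

-- ===== CLAIM (what is proved, stated in full; the proofs are below) =====
def Claim_equal_printer_error : Prop := ∀ (s : String), Dom_printer_error s → Spec_printer_error s (printer_error s)

-- ===== LEMMAS AND PROOFS =====

-- A's inner scan over the 13-element table adds 1 exactly when k lies in the
-- contiguous range 'n'..'z' (true over all of Char, no domain hypothesis needed).
theorem inner_eq (k : Char) (acc : Int) :
    unacceptable_symbols.foldl (fun a i => if k == i then a + 1 else a) acc
      = if 'n' ≤ k ∧ k ≤ 'z' then acc + 1 else acc := by
  by_cases h : k ∈ unacceptable_symbols
  · simp only [unacceptable_symbols, List.mem_cons, List.not_mem_nil, or_false] at h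
    rcases h with h|h|h|h|h|h|h|h|h|h|h|h|h <;> subst h <;>
      simp [unacceptable_symbols, List.foldl]
  · have hk : ¬ ('n' ≤ k ∧ k ≤ 'z') := by
      rintro ⟨h1, h2⟩
      apply h
      have e : k = Char.ofNat k.toNat := (Char.ofNat_toNat k).symm
      rw [Char.le_def, UInt32.le_iff_toNat_le] at h1 h2
      have l1 : 110 ≤ k.toNat := h1
      have l2 : k.toNat ≤ 122 := h2
      interval_cases hn : k.toNat <;> rw [e] <;> decide
    simp only [unacceptable_symbols, List.mem_cons, List.not_mem_nil, or_false,
      not_or] at h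
    obtain ⟨h1,h2,h3,h4,h5,h6,h7,h8,h9,h10,h11,h12,h13⟩ := h
    simp [unacceptable_symbols, List.foldl,
      h1,h2,h3,h4,h5,h6,h7,h8,h9,h10,h11,h12,h13, hk]

-- A's count is the number of characters in the range 'n'..'z'.
theorem a_count_eq (s : String) :
    s.toList.foldl
      (fun acc k =>
        unacceptable_symbols.foldl (fun c i => if k == i then c + 1 else c) acc)
      0
    = (s.toList.countP (fun c => decide ('n' ≤ c ∧ c ≤ 'z')) : Int) := by
  rw [show (fun (acc : Int) (k : Char) =>
        unacceptable_symbols.foldl (fun c i => if k == i then c + 1 else c) acc)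
      = (fun (acc : Int) (k : Char) => if 'n' ≤ k ∧ k ≤ 'z' then acc + 1 else acc)
    from funext fun a => funext fun k => inner_eq k a]
  simpa using PySem.List.foldl_ite_add_one (fun k => 'n' ≤ k ∧ k ≤ 'z') s.toList 0

-- countP of a list whose first r positions satisfy p and whose later positions do not, is r.
theorem countP_of_split (t : List Int) (p : Int → Bool) (r : Nat) (hr : r ≤ t.length)
    (h1 : ∀ (j : Nat) (hj : j < t.length), j < r → p t[j])
    (h2 : ∀ (j : Nat) (hj : j < t.length), r ≤ j → ¬ p t[j]) :
    t.countP p = r := by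
  have hsplit : t = t.take r ++ t.drop r := (List.take_append_drop r t).symm
  rw [hsplit, List.countP_append]
  have htake : (t.take r).countP p = (t.take r).length := by
    rw [List.countP_eq_length]
    intro a ha
    obtain ⟨i, hi, hia⟩ := List.mem_iff_getElem.1 ha
    have hlt : i < r := by
      have := hi; simp [List.length_take] at this; omega
    have hit : i < t.length := by omega
    have : (t.take r)[i] = t[i] := List.getElem_take
    rw [← hia, this]
    exact h1 i hit hlt
  have hdrop : (t.drop r).countP p = 0 := by
    rw [List.countP_eq_zero]
    intro a ha
    obtain ⟨i, hi, hia⟩ := List.mem_iff_getElem.1 ha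
    have hit : r + i < t.length := by
      have := hi; simp [List.length_drop] at this; omega
    have : (t.drop r)[i] = t[r + i] := List.getElem_drop ..
    rw [← hia, this]
    exact h2 (r + i) hit (by omega)
  rw [htake, hdrop, List.length_take]
  omega

-- lower_bound maintains its invariant and lands on countP (· < x) for a sorted list.
theorem lower_bound_countP (t : List Int) (x : Int) (lo hi : Nat)
    (hs : t.Pairwise (· ≤ ·)) (hhi : hi ≤ t.length) (hlh : lo ≤ hi)
    (h1 : ∀ (j : Nat) (hj : j < t.length), j < lo → t[j] < x)
    (h2 : ∀ (j : Nat) (hj : j < t.length), hi ≤ j → ¬ t[j] < x) :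
    lower_bound t x lo hi = t.countP (fun a => decide (a < x)) := by
  induction lo, hi using lower_bound.induct t x with
  | case1 lo hi h mid hmid ih =>
    have hm : mid = (lo + hi) / 2 := rfl
    have hmlo : lo ≤ mid := by rw [hm]; omega
    have hmhi : mid < hi := by rw [hm]; omega
    have hmidlt : mid < t.length := by omega
    rw [lower_bound, dif_pos h, if_pos (hm ▸ hmid)]
    refine ih hhi (by omega) ?_ h2
    intro j hj hjm
    rcases Nat.lt_or_ge j mid with hc | hc
    · have hle : t[j] ≤ t[mid] :=
        (List.pairwise_iff_getElem.1 hs) j mid hj hmidlt hc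
      calc t[j] ≤ t[mid] := hle
        _ = t.getD mid 0 := (List.getD_eq_getElem t 0 hmidlt).symm
        _ < x := hmid
    · have hjm' : j = mid := by omega
      rw [show t[j] = t.getD j 0 from (List.getD_eq_getElem t 0 hj).symm, hjm']
      exact hmid
  | case2 lo hi h mid hmid ih =>
    have hm : mid = (lo + hi) / 2 := rfl
    have hmlo : lo ≤ mid := by rw [hm]; omega
    have hmhi : mid < hi := by rw [hm]; omega
    have hmidlt : mid < t.length := by omega
    rw [lower_bound, dif_pos h, if_neg (hm ▸ hmid)]
    refine ih (by omega) hmlo h1 ?_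
    intro j hj hjm
    rcases Nat.lt_or_ge j hi with hc | hc
    · intro hlt
      apply hmid
      rcases Nat.lt_or_ge mid j with hc2 | hc2
      · have hle : t[mid] ≤ t[j] :=
          (List.pairwise_iff_getElem.1 hs) mid j hmidlt hj hc2
        have hgd : t.getD mid 0 = t[mid] := List.getD_eq_getElem t 0 hmidlt
        rw [hgd]; omega
      · have hjm' : j = mid := by omega
        rw [← List.getD_eq_getElem t 0 hj] at hlt
        rw [hjm'] at hlt
        exact hlt
    · exact h2 j hj hc
  | case3 lo hi h =>
    rw [lower_bound, dif_neg h]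
    have hlo : lo = hi := by omega
    subst hlo
    exact (countP_of_split t (fun a => decide (a < x)) lo (by omega)
      (fun j hj hjlo => decide_eq_true (h1 j hj hjlo))
      (fun j hj hge => by simpa using h2 j hj hge)).symm

-- full-interval corollary on a sorted list
theorem lower_bound_full (t : List Int) (x : Int) (hs : t.Pairwise (· ≤ ·)) :
    lower_bound t x 0 t.length = t.countP (fun a => decide (a < x)) :=
  lower_bound_countP t x 0 t.length hs le_rfl (Nat.zero_le _)
    (fun j _ hj => absurd hj (Nat.not_lt_zero j))
    (fun j hj hge => absurd hj (by omega))

-- per-element splitting of the two strict-bound counts into the range count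
theorem countP_range_split (l : List Char) :
    (l.countP (fun c => decide (((c.toNat : Int)) < 123)) : Int)
      - (l.countP (fun c => decide (((c.toNat : Int)) < 110)) : Int)
    = (l.countP (fun c => decide ('n' ≤ c ∧ c ≤ 'z')) : Int) := by
  induction l with
  | nil => simp
  | cons c cs ih =>
    have hrange : ('n' ≤ c ∧ c ≤ 'z') ↔ (110 ≤ c.toNat ∧ c.toNat < 123) := by
      rw [Char.le_def, Char.le_def, UInt32.le_iff_toNat_le, UInt32.le_iff_toNat_le]
      have hn : ('n'.val.toNat) = 110 := by decide
      have hz : ('z'.val.toNat) = 122 := by decide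
      have hvt : c.toNat = c.val.toNat := rfl
      rw [hn, hz, hvt]
      omega
    simp only [List.countP_cons, hrange, decide_eq_true_eq]
    by_cases h1 : (c.toNat : Int) < 110 <;> by_cases h2 : (c.toNat : Int) < 123 <;>
      simp only [h1, h2, if_true, if_false] <;>
      split_ifs with h3 <;> push_cast <;> omega

-- ===== VERDICT (by name: the statement is the Claim_ definition above) =====
set_option maxRecDepth 4096 in
theorem printer_error_spec : Claim_equal_printer_error := by
  intro s _
  unfold Spec_printer_error
  simp only [printer_error, printer_error_alt]
  rw [a_count_eq]
  have hpw : (PySem.List.sorted (s.toList.map (fun c => (c.toNat : Int))) (fun x => x) false).Pairwise (· ≤ ·) := by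
    simpa using PySem.List.sorted_pairwise (s.toList.map (fun c => (c.toNat : Int))) (fun x => x)
  rw [lower_bound_full _ 123 hpw, lower_bound_full _ 110 hpw]
  have hperm := PySem.List.sorted_perm (s.toList.map (fun c => (c.toNat : Int))) (fun x => x) false
  rw [hperm.countP_eq, hperm.countP_eq, List.countP_map, List.countP_map]
  rw [← countP_range_split s.toList]
  rfl
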